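-- pv_equiv track=rewrite | github.com/ElixirTrials/rune | libs/model-training/src/model_training/diff_loss.py | _iter_assistant_spans
-- ===== SOURCE A (Python) =====
-- IGNORE_INDEX: int = -100
--
-- def _iter_assistant_spans(
--     labels: list[int],
-- ) -> list[tuple[int, int]]:
--     """Yield half-open ``(start, end)`` ranges of contiguous label-bearing tokens.
--
--     A span is a maximal run of positions where ``label != IGNORE_INDEX``.
--     Used by the diff-aware collator to recover per-assistant-turn boundaries
--     from the labels tensor that the inner ``DataCollatorForLanguageModeling``
--     produces (which already merged ``assistant_masks`` into the label mask).
--     """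
--     spans: list[tuple[int, int]] = []
--     n = len(labels)
--     i = 0
--     while i < n:
--         if labels[i] == IGNORE_INDEX:
--             i += 1
--             continue
--         start = i
--         while i < n and labels[i] != IGNORE_INDEX:
--             i += 1
--         spans.append((start, i))
--     return spans
-- ===== SOURCE B (Python) =====
-- IGNORE_INDEX: int = -100
--
-- def _iter_assistant_spans(labels):
--     spans = []
--     start = None
--     for i, lab in enumerate(labels):
--         if lab != IGNORE_INDEX:
--             if start is None:
--                 start = i
--         elif start is not None:
--             spans.append((start, i))
--             start = None
--     if start is not None:
--         spans.append((start, len(labels)))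
--     return spans
-- ===== Notes on version B (the rewrite author's own statement) =====
-- stated objective: idiomatic
-- what changed: Replaces the nested while-loops with manual index bookkeeping by a single for-loop state machine over enumerate(labels) that tracks the current run's start and flushes an open run after the loop.
import Mathlib
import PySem

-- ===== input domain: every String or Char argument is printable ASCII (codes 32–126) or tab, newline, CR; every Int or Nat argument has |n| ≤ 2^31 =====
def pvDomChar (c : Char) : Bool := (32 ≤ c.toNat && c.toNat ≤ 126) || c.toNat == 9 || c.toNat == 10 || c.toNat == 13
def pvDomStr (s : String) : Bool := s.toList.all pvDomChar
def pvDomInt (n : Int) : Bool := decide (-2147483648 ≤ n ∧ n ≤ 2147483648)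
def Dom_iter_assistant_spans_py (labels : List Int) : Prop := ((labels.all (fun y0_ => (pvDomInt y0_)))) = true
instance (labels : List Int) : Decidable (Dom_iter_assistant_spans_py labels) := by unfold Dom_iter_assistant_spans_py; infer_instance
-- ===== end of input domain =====

-- B is the same task written as an idiomatic single for-loop state machine (tracked run start
-- flushed on close / at the end) instead of A's nested while-loops with manual index bookkeeping.

-- ===== PORT A =====
-- inner 'while i < n and labels[i] != IGNORE_INDEX: i += 1' of A, on the remaining suffix:
-- returns the final i together with the unconsumed suffix.
def pvInnerA : List Int → Int → Int × List Int
  | [], i => (i, [])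
  | x :: xs, i => if x ≠ -100 then pvInnerA xs (i + 1) else (i, x :: xs)

theorem pvInnerA_len : ∀ (l : List Int) (i : Int), (pvInnerA l i).2.length ≤ l.length := by
  intro l
  induction l with
  | nil => intro i; simp [pvInnerA]
  | cons x xs ih =>
    intro i
    by_cases h : x ≠ (-100 : Int)
    · simp only [pvInnerA, if_pos h]
      exact Nat.le_succ_of_le (ih (i + 1))
    · simp [pvInnerA, if_neg h]

-- outer 'while i < n' of A: one step per remaining element / run, in A's branch order.
def pvOuterA : List Int → Int → List (Int × Int)
  | [], _ => []
  | x :: xs, i =>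
    if x = -100 then pvOuterA xs (i + 1)
    else
      let p := pvInnerA xs (i + 1)
      (i, p.1) :: pvOuterA p.2 p.1
termination_by l _ => l.length
decreasing_by
  · simp only [List.length_cons]; omega
  · show (pvInnerA xs (i + 1)).2.length < (x :: xs).length
    have h := pvInnerA_len xs (i + 1)
    simp only [List.length_cons]
    omega

def iter_assistant_spans_py (labels : List Int) : List (Int × Int) :=
  pvOuterA labels 0

-- ===== PORT B =====
-- the body of B's for-loop: state is (current run start if any, spans so far)
def pvStepB (st : Option Int × List (Int × Int)) (p : Int × Int) : Option Int × List (Int × Int) :=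
  if p.2 ≠ -100 then
    match st.1 with
    | none => (some p.1, st.2)
    | some s => (some s, st.2)
  else
    match st.1 with
    | some s => (none, st.2 ++ [(s, p.1)])
    | none => (none, st.2)

def iter_assistant_spans_py_alt (labels : List Int) : List (Int × Int) :=
  let r := (PySem.List.enumerate labels).foldl pvStepB (none, [])
  match r.1 with
  | some s => r.2 ++ [(s, (labels.length : Int))]
  | none => r.2

-- ===== PRECONDITION & SPEC =====
def Spec_iter_assistant_spans_py (labels : List Int) (out : List (Int × Int)) : Prop := out = iter_assistant_spans_py_alt labels
instance (labels : List Int) (out : List (Int × Int)) : Decidable (Spec_iter_assistant_spans_py labels out) := by unfold Spec_iter_assistant_spans_py; infer_instance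

-- ===== CLAIM (what is proved, stated in full; the proofs are below) =====
def Claim_equal_iter_assistant_spans_py : Prop := ∀ (labels : List Int), Dom_iter_assistant_spans_py labels → Spec_iter_assistant_spans_py labels (iter_assistant_spans_py labels)

-- ===== LEMMAS AND PROOFS =====

-- B's loop written as structural recursion (loopB l i st = spans B emits from suffix l at index i
-- with open-run state st, final flush at i + l.length).
def pvLoopB : List Int → Int → Option Int → List (Int × Int)
  | [], _, none => []
  | [], i, some s => [(s, i)]
  | x :: xs, i, none =>
    if x ≠ -100 then pvLoopB xs (i + 1) (some i) else pvLoopB xs (i + 1) none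
  | x :: xs, i, some s =>
    if x ≠ -100 then pvLoopB xs (i + 1) (some s)
    else (s, i) :: pvLoopB xs (i + 1) none

theorem pvFold_eq_loopB :
    ∀ (l : List Int) (i : Int) (st : Option Int) (acc : List (Int × Int)),
      (match ((PySem.List.enumerate l i).foldl pvStepB (st, acc)) with
        | (some s, sp) => sp ++ [(s, i + (l.length : Int))]
        | (none, sp) => sp)
      = acc ++ pvLoopB l i st := by
  intro l
  induction l with
  | nil =>
    intro i st acc
    cases st <;> simp [PySem.List.enumerate, pvLoopB]
  | cons x xs ih =>
    intro i st acc
    rw [PySem.List.enumerate_cons]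
    have e : i + ((x :: xs).length : Int) = (i + 1) + (xs.length : Int) := by
      simp only [List.length_cons]; push_cast; ring
    by_cases hx : x ≠ (-100 : Int)
    · cases st with
      | none =>
        simp only [List.foldl_cons, pvStepB, pvLoopB]
        rw [e, ih]
        simp [hx]
      | some s =>
        simp only [List.foldl_cons, pvStepB, pvLoopB]
        rw [e, ih]
        simp [hx]
    · cases st with
      | none =>
        simp only [List.foldl_cons, pvStepB, pvLoopB, hx, ite_false]
        rw [e, ih]
      | some s =>
        simp only [List.foldl_cons, pvStepB, pvLoopB, hx, ite_false]
        rw [e, ih, List.append_assoc, List.singleton_append]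

-- loopB in a run started at s equals A's inner scan followed by the emitted span.
theorem pvLoopB_some :
    ∀ (l : List Int) (i s : Int),
      pvLoopB l i (some s) = (s, (pvInnerA l i).1) :: pvLoopB (pvInnerA l i).2 (pvInnerA l i).1 none := by
  intro l
  induction l with
  | nil => intro i s; simp [pvLoopB, pvInnerA]
  | cons x xs ih =>
    intro i s
    by_cases hx : x ≠ (-100 : Int)
    · simp only [pvLoopB, pvInnerA, if_pos hx]
      exact ih (i + 1) s
    · simp only [pvLoopB, pvInnerA, if_neg hx]

theorem pvOuterA_eq_loopB_aux :
    ∀ (n : Nat) (l : List Int), l.length ≤ n → ∀ (i : Int), pvOuterA l i = pvLoopB l i none := by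
  intro n
  induction n with
  | zero =>
    intro l hl i
    have : l = [] := List.eq_nil_of_length_eq_zero (Nat.le_zero.mp hl)
    subst this
    simp [pvOuterA, pvLoopB]
  | succ n ih =>
    intro l hl i
    cases l with
    | nil => simp [pvOuterA, pvLoopB]
    | cons x xs =>
      simp only [List.length_cons, Nat.succ_le_succ_iff] at hl
      by_cases hx : x = (-100 : Int)
      · rw [pvOuterA]
        simp only [if_pos hx]
        rw [ih xs hl (i + 1), pvLoopB]
        simp [hx]
      · rw [pvOuterA]
        simp only [if_neg hx]
        rw [pvLoopB]
        simp only [ne_eq, hx, not_false_iff, ite_true]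
        rw [pvLoopB_some xs (i + 1) i]
        rw [ih (pvInnerA xs (i + 1)).2 (Nat.le_trans (pvInnerA_len xs (i + 1)) hl) (pvInnerA xs (i + 1)).1]

theorem pvOuterA_eq_loopB :
    ∀ (l : List Int) (i : Int), pvOuterA l i = pvLoopB l i none := by
  intro l i
  exact pvOuterA_eq_loopB_aux l.length l le_rfl i

-- ===== VERDICT (by name: the statement is the Claim_ definition above) =====
theorem iter_assistant_spans_py_spec : Claim_equal_iter_assistant_spans_py := by
  intro labels _
  unfold Spec_iter_assistant_spans_py iter_assistant_spans_py iter_assistant_spans_py_alt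
  have h := pvFold_eq_loopB labels 0 none []
  simp only [List.nil_append, zero_add] at h
  rw [pvOuterA_eq_loopB, ← h]
  cases hfold : List.foldl pvStepB (none, []) (PySem.List.enumerate labels) with
  | mk st sp => cases st <;> simp
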